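-- pv_equiv track=rewrite | github.com/NielsVeenstraTue/5SIB0_group2_2024 | VasilisImplementation/cDDPR.py | convertDep2dict
-- ===== SOURCE A (Python) =====
-- def convertDep2dict(dependencies):
--     # Convert dependencies xml to working dictionary format
--     predecessors = []
--     successors = []
--     dictionary = {}
--     for id, task in enumerate(dependencies):
--         predecessors.append(task['pre'])
--         successors.append(task['succ'])
--
--     for pred, succ in zip(predecessors, successors):
--         if pred in dictionary:
--             dictionary[pred].append(succ)
--         else:
--             dictionary[pred] = [succ]
--
--     for key in dictionary:
--         dictionary[key].sort()
--
--     return dictionary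
-- ===== SOURCE B (Python) =====
-- def convertDep2dict(dependencies):
--     # Sort all (pred, succ) pairs once by successor, then distribute into buckets:
--     # each bucket comes out ascending with no per-group sort.
--     pairs = [(task['pre'], task['succ']) for task in dependencies]
--     dictionary = {pred: [] for pred, _ in pairs}
--     for pred, succ in sorted(pairs, key=lambda p: p[1]):
--         dictionary[pred].append(succ)
--     return dictionary
-- ===== Notes on version B (the rewrite author's own statement) =====
-- stated objective: alternative
-- what changed: Instead of grouping successors per predecessor and then sorting every bucket, B sorts the (pred, succ) pair list once by successor and distributes the pre-sorted pairs into pre-created buckets in a single pass, so no per-group sort is needed.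
import Mathlib
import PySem

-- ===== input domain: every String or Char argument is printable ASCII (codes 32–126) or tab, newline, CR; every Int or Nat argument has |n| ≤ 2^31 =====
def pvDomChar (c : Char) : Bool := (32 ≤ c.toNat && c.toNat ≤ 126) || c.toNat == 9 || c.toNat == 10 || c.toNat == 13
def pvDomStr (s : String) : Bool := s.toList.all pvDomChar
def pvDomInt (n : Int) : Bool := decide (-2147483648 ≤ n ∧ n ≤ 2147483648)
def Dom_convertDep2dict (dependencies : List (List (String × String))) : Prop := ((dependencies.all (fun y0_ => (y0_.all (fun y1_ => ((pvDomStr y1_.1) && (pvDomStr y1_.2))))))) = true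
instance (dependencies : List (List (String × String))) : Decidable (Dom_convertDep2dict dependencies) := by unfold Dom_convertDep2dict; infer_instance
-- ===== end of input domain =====

-- B replaces A's "group, then sort each bucket" by "sort all (pred, succ) pairs once by successor,
-- then distribute into pre-created buckets"; same values, an alternative decomposition (no speed claim).

-- ===== PORT A =====
-- task['k'] on a Python dict given as an association list: first match; none = KeyError
def pvKey? (t : List (String × String)) (k : String) : Option String :=
  (t.find? (fun p => p.1 == k)).map (·.2)

def convertDep2dict (dependencies : List (List (String × String))) : List (String × List String) :=
  let predecessors := dependencies.foldl (fun acc task => acc ++ [(pvKey? task "pre").getD ""]) []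
  let successors := dependencies.foldl (fun acc task => acc ++ [(pvKey? task "succ").getD ""]) []
  -- (.getD "" is never taken: Pre_ guarantees both keys are present)
  let dictionary := (predecessors.zip successors).foldl
    (fun d ps => if d.contains ps.1 then d.modify ps.1 [] (fun l => l ++ [ps.2]) else d.insert ps.1 [ps.2])
    (PySem.Dict.empty : PySem.Dict String (List String))
  let dictionary := dictionary.keys.foldl
    (fun d k => d.modify k [] (fun l => PySem.List.sorted l (fun x => x) false)) dictionary
  dictionary.items

-- ===== PORT B =====
def convertDep2dict_alt (dependencies : List (List (String × String))) : List (String × List String) :=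
  let pairs := dependencies.map (fun task => ((pvKey? task "pre").getD "", (pvKey? task "succ").getD ""))
  let dictionary := pairs.foldl (fun d p => d.insert p.1 ([] : List String))
    (PySem.Dict.empty : PySem.Dict String (List String))
  let dictionary := (PySem.List.sorted pairs (fun p => p.2) false).foldl
    (fun d p => d.modify p.1 [] (fun l => l ++ [p.2])) dictionary
  dictionary.items

-- ===== PRECONDITION & SPEC =====
-- Pre_ excludes exactly the inputs where A raises KeyError: a task dict lacking key 'pre' or 'succ'.
def Pre_convertDep2dict (dependencies : List (List (String × String))) : Prop :=
  ∀ t ∈ dependencies, "pre" ∈ t.map Prod.fst ∧ "succ" ∈ t.map Prod.fst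
instance (dependencies : List (List (String × String))) : Decidable (Pre_convertDep2dict dependencies) := by
  unfold Pre_convertDep2dict; infer_instance
def pvWitness_convertDep2dict : (List (List (String × String))) :=
  [[("pre", "a"), ("succ", "b")], [("pre", "a"), ("succ", "a")]]

def Spec_convertDep2dict (dependencies : List (List (String × String))) (out : List (String × List String)) : Prop := out = convertDep2dict_alt dependencies
instance (dependencies : List (List (String × String))) (out : List (String × List String)) : Decidable (Spec_convertDep2dict dependencies out) := by unfold Spec_convertDep2dict; infer_instance

-- ===== CLAIM (what is proved, stated in full; the proofs are below) =====
def Claim_equal_convertDep2dict : Prop := ∀ (dependencies : List (List (String × String))), Dom_convertDep2dict dependencies → Pre_convertDep2dict dependencies → Spec_convertDep2dict dependencies (convertDep2dict dependencies)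

-- ===== LEMMAS AND PROOFS =====

-- A's grow-or-create branch is exactly Dict.modify
lemma stepA_eq_modify (d : PySem.Dict String (List String)) (ps : String × String) :
    (if d.contains ps.1 then d.modify ps.1 [] (fun l => l ++ [ps.2]) else d.insert ps.1 [ps.2]) =
      d.modify ps.1 [] (fun l => l ++ [ps.2]) := by
  by_cases h : d.contains ps.1
  · simp [h]
  · simp only [Bool.not_eq_true] at h
    simp [h, PySem.Dict.modify, PySem.Dict.getD_of_not_contains _ _ h]

-- getD through A's per-key sorting loop over Nodup keys
lemma getD_foldl_sort (ks : List String) (hnd : ks.Nodup) (d : PySem.Dict String (List String)) (c : String) :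
    (ks.foldl (fun d k => d.modify k [] (fun l => PySem.List.sorted l (fun x => x) false)) d).getD c [] =
      if c ∈ ks then PySem.List.sorted (d.getD c []) (fun x => x) false else d.getD c [] := by
  induction ks generalizing d with
  | nil => simp
  | cons k t ih =>
    simp only [List.nodup_cons] at hnd
    simp only [List.foldl_cons, ih hnd.2, PySem.Dict.getD_modify, List.mem_cons]
    by_cases hck : c = k
    · subst hck
      simp [hnd.1]
    · simp [hck]

-- getD through B's bucket-creating loop: every stored value is []
lemma getD_foldl_insert_nil (l : List (String × String)) (d : PySem.Dict String (List String)) (c : String)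
    (h : d.getD c [] = []) :
    (l.foldl (fun d p => d.insert p.1 ([] : List String)) d).getD c [] = [] := by
  induction l generalizing d with
  | nil => simpa using h
  | cons p t ih =>
    simp only [List.foldl_cons]
    apply ih
    rw [PySem.Dict.getD_insert]
    split_ifs with hc
    · rfl
    · exact h

-- Set.update adds nothing when everything is already present
lemma set_update_of_subset (s : PySem.Set String) (xs : List String) (h : ∀ x ∈ xs, x ∈ s) :
    PySem.Set.update s xs = s := by
  rw [PySem.Set.update_eq_append_filter]
  have hf : (PySem.Set.ofList xs).filter (fun y => !(PySem.Set.contains s y)) = [] := by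
    rw [List.filter_eq_nil_iff]
    intro a ha
    have hm := h a ((PySem.Set.mem_ofList _ _).mp ha)
    simp
    exact hm
  rw [hf, List.append_nil]

-- the heart: a bucket sorted on its own equals its slice of the globally succ-sorted pair list
lemma bucket_eq (pairs : List (String × String)) (k : String) :
    PySem.List.sorted ((pairs.filter (fun p => p.1 == k)).map (·.2)) (fun x => x) false =
      ((PySem.List.sorted pairs (fun p => p.2) false).filter (fun p => p.1 == k)).map (·.2) := by
  apply PySem.List.sorted_id_eq_of_perm_of_pairwise
  · exact ((PySem.List.sorted_perm pairs (fun p => p.2) false).filter _).map _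
  · have hp := PySem.List.sorted_pairwise (xs := pairs) (key := fun p => p.2) (κ := String)
    exact List.pairwise_map.mpr (List.Pairwise.sublist List.filter_sublist hp)

-- ===== VERDICT (by name: the statement is the Claim_ definition above) =====
theorem convertDep2dict_spec : Claim_equal_convertDep2dict := by
  intro deps _ _
  unfold Spec_convertDep2dict convertDep2dict convertDep2dict_alt
  dsimp only
  rw [PySem.List.foldl_append_singleton_eq_map, PySem.List.foldl_append_singleton_eq_map,
    List.nil_append, List.nil_append, List.zip_map']
  set pairs := deps.map (fun task => ((pvKey? task "pre").getD "", (pvKey? task "succ").getD "")) with hpairs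
  -- A's first dict loop is the modify loop
  have hstep : pairs.foldl
      (fun d ps => if d.contains ps.1 then d.modify ps.1 [] (fun l => l ++ [ps.2]) else d.insert ps.1 [ps.2])
      (PySem.Dict.empty : PySem.Dict String (List String)) =
      pairs.foldl (fun d p => d.modify p.1 [] (fun l => l ++ [p.2])) PySem.Dict.empty :=
    PySem.List.foldl_congr_mem _ _ _ _ (fun acc x _ => stepA_eq_modify acc x)
  rw [hstep]
  set dA := pairs.foldl (fun d p => d.modify p.1 [] (fun l => l ++ [p.2]))
    (PySem.Dict.empty : PySem.Dict String (List String)) with hdA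
  set d0 := pairs.foldl (fun d p => d.insert p.1 ([] : List String))
    (PySem.Dict.empty : PySem.Dict String (List String)) with hd0
  set sp := PySem.List.sorted pairs (fun p => p.2) false with hsp
  set dB := sp.foldl (fun d p => d.modify p.1 [] (fun l => l ++ [p.2])) d0 with hdB
  set dS := dA.keys.foldl (fun d k => d.modify k [] (fun l => PySem.List.sorted l (fun x => x) false)) dA with hdS
  set K := PySem.Set.ofList (pairs.map (·.1)) with hKdef
  -- keys
  have hKA : dA.keys = K := by
    rw [hdA, PySem.Dict.keys_foldl_modify_key, PySem.Dict.keys_empty, PySem.Set.update_nil_left]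
  have hndA : dA.keys.Nodup := by
    rw [hdA]; exact PySem.Dict.nodup_keys_foldl_modify_key _ _ _ _ _ PySem.Dict.nodup_keys_empty
  have hK0 : d0.keys = K := by
    rw [hd0, PySem.Dict.keys_foldl_insert_key, PySem.Dict.keys_empty, PySem.Set.update_nil_left]
  have hKB : dB.keys = K := by
    rw [hdB, PySem.Dict.keys_foldl_modify_key, hK0]
    apply set_update_of_subset
    intro x hx
    rcases List.mem_map.mp hx with ⟨p, hp, rfl⟩
    exact (PySem.Set.mem_ofList _ _).mpr (List.mem_map.mpr ⟨p, ((PySem.List.mem_sorted _ _ _ _).mp hp), rfl⟩)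
  have hKS : dS.keys = K := by
    rw [hdS, PySem.Dict.keys_foldl_modify, hKA]
    exact set_update_of_subset _ _ (fun x hx => hx)
  have hndB : dB.keys.Nodup := by
    rw [hdB]
    apply PySem.Dict.nodup_keys_foldl_modify_key
    rw [hd0]; exact PySem.Dict.nodup_keys_foldl_insert_key _ _ _ _ PySem.Dict.nodup_keys_empty
  have hndS : dS.keys.Nodup := by
    rw [hdS]
    exact PySem.Dict.nodup_keys_foldl_modify_key _ _ _ _ _ hndA
  -- values
  have hvA : ∀ c, dA.getD c [] = (pairs.filter (fun p => p.1 == c)).map (·.2) := by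
    intro c
    rw [hdA, PySem.Dict.getD_foldl_modify_append, PySem.Dict.getD_empty, List.nil_append]
  have hvB : ∀ c, dB.getD c [] = (sp.filter (fun p => p.1 == c)).map (·.2) := by
    intro c
    rw [hdB, PySem.Dict.getD_foldl_modify_append,
      getD_foldl_insert_nil _ _ _ (by rw [PySem.Dict.getD_empty]), List.nil_append]
  -- items
  rw [PySem.Dict.items_eq_map_keys dS hndS [], PySem.Dict.items_eq_map_keys dB hndB [], hKS, hKB]
  apply List.map_congr_left
  intro k hk
  have hkA : k ∈ dA.keys := by rw [hKA]; exact hk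
  rw [hdS, getD_foldl_sort _ hndA, if_pos hkA, hvA, hvB, hsp]
  rw [bucket_eq]
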